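-- pv_equiv track=rewrite | github.com/KaminariSora/AI-Chat | TestFolder/TextRecognize.py | calculate_count
-- ===== SOURCE A (Python) =====
-- def calculate_count(sentence):
--     sentence = sentence.strip()  # Remove leading and trailing spaces
--     if not sentence:
--         return (0, 0, 0, 0, "")
--
--     word_count = 0
--     space_count = 0
--     char_count = 0
--     vowel_count = 0
--     vowel_list = ['a', 'A', 'e', 'E', 'i', 'I', 'o', 'O', 'u', 'U']
--
--     # Initialize variables to build words from continuous characters
--     temp_word = ""
--     words = []
--
--     for char in sentence:
--         if char.isalpha():  # Consider alphabetic characters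
--             temp_word += char
--             char_count += 1
--             if char in vowel_list:
--                 vowel_count += 1
--         else:
--             if temp_word:
--                 words.append(temp_word)
--                 word_count += 1
--                 temp_word = ""
--             if char == ' ':
--                 space_count += 1
--
--     if temp_word:
--         words.append(temp_word)
--         word_count += 1
--
--     formatted_sentence = ' '.join(words)
--
--     return (word_count, space_count, char_count, vowel_count, formatted_sentence)
-- ===== SOURCE B (Python) =====
-- def calculate_count(sentence):
--     sentence = sentence.strip()
--     if not sentence:
--         return (0, 0, 0, 0, "")
--     words = ''.join(c if c.isalpha() else ' ' for c in sentence).split()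
--     word_count = len(words)
--     space_count = sum(c == ' ' for c in sentence)
--     char_count = sum(len(w) for w in words)
--     vowel_count = sum(c in 'aeiouAEIOU' for c in sentence)
--     return (word_count, space_count, char_count, vowel_count, ' '.join(words))
-- ===== Notes on version B (the rewrite author's own statement) =====
-- stated objective: idiomatic
-- what changed: Replaced A's single char-by-char state machine (pending word buffer, interleaved counters) with a mask-non-alpha-to-space then split() word extraction plus four independent one-line reductions over the string and the word list.
import Mathlib
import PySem

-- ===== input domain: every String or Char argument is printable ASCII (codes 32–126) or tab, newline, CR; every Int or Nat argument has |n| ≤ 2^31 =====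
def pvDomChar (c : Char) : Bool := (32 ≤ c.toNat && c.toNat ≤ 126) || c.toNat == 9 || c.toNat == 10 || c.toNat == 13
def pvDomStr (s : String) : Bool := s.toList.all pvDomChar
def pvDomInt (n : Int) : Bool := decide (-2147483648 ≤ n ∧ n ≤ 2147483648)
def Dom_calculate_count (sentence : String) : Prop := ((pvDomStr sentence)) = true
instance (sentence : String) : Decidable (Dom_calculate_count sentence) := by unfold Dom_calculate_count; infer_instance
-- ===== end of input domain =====

-- B rewrites A's char-by-char state machine as mask-to-space word extraction plus independent reductions (idiomatic; same O(n) cost).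

-- ===== PORT A =====
def pvVowelList : List Char := ['a', 'A', 'e', 'E', 'i', 'I', 'o', 'O', 'u', 'U']

-- one iteration of A's for-loop over (word_count, space_count, char_count, vowel_count, temp_word, words)
def pvStepA (st : Int × Int × Int × Int × List Char × List (List Char)) (c : Char) :
    Int × Int × Int × Int × List Char × List (List Char) :=
  match st with
  | (wc, sc, cc, vc, temp, words) =>
    if PySem.Chars.isalpha c then
      (wc, sc, cc + 1, if pvVowelList.contains c then vc + 1 else vc, temp ++ [c], words)
    else
      match (if temp.isEmpty then (wc, temp, words) else (wc + 1, ([] : List Char), words ++ [temp])) with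
      | (wc, temp, words) => (wc, if c = ' ' then sc + 1 else sc, cc, vc, temp, words)

def calculate_count (sentence : String) : Int × Int × Int × Int × String :=
  let s := PySem.Chars.strip sentence.toList
  if s.isEmpty then (0, 0, 0, 0, "")
  else
    match s.foldl pvStepA (0, 0, 0, 0, ([] : List Char), ([] : List (List Char))) with
    | (wc, sc, cc, vc, temp, words) =>
      match (if temp.isEmpty then (wc, words) else (wc + 1, words ++ [temp])) with
      | (wc, words) => (wc, sc, cc, vc, String.ofList (PySem.Chars.join [' '] words))

-- ===== PORT B =====
def calculate_count_alt (sentence : String) : Int × Int × Int × Int × String :=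
  let s := PySem.Chars.strip sentence.toList
  if s.isEmpty then (0, 0, 0, 0, "")
  else
    let words := PySem.Chars.split₀ (s.map (fun c => if PySem.Chars.isalpha c then c else ' '))
    ((words.length : Int),
     ((s.countP (fun c => c == ' ') : Nat) : Int),
     (((words.map List.length).sum : Nat) : Int),
     ((s.countP (fun c => PySem.Chars.isIn [c] "aeiouAEIOU".toList) : Nat) : Int),
     String.ofList (PySem.Chars.join [' '] words))

-- ===== PRECONDITION & SPEC =====
def Spec_calculate_count (sentence : String) (out : Int × Int × Int × Int × String) : Prop := out = calculate_count_alt sentence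
instance (sentence : String) (out : Int × Int × Int × Int × String) : Decidable (Spec_calculate_count sentence out) := by unfold Spec_calculate_count; infer_instance

-- ===== CLAIM (what is proved, stated in full; the proofs are below) =====
def Claim_equal_calculate_count : Prop := ∀ (sentence : String), Dom_calculate_count sentence → Spec_calculate_count sentence (calculate_count sentence)

-- ===== LEMMAS AND PROOFS =====

-- the maximal alpha runs of cs, with pending buffer temp (abstract spec of both tokenizers)
def pvToks (temp : List Char) : List Char → List (List Char)
  | [] => if temp.isEmpty then [] else [temp]
  | c :: cs =>
    if PySem.Chars.isalpha c then pvToks (temp ++ [c]) cs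
    else (if temp.isEmpty then [] else [temp]) ++ pvToks [] cs

-- A's post-loop finalization, as a function of the loop state
def pvFin (st : Int × Int × Int × Int × List Char × List (List Char)) :
    Int × Int × Int × Int × List (List Char) :=
  match st with
  | (wc, sc, cc, vc, temp, words) =>
    if temp.isEmpty then (wc, sc, cc, vc, words) else (wc + 1, sc, cc, vc, words ++ [temp])

theorem pv_alpha_not_space (c : Char) (h : PySem.Chars.isalpha c = true) : c ≠ ' ' := by
  intro hc; subst hc; simp [PySem.Chars.isalpha, PySem.Chars.isupper, PySem.Chars.islower] at h

theorem pv_vowel_alpha (c : Char) (h : pvVowelList.contains c = true) : PySem.Chars.isalpha c = true := by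
  simp [pvVowelList] at h
  rcases h with h|h|h|h|h|h|h|h|h|h <;> subst h <;> decide

theorem pv_foldA (cs : List Char) : ∀ (wc sc cc vc : Int) (temp : List Char) (words : List (List Char)),
    pvFin (cs.foldl pvStepA (wc, sc, cc, vc, temp, words))
    = (wc + ((pvToks temp cs).length : Int),
       sc + (cs.countP (fun c => decide (c = ' ')) : Int),
       cc + (cs.countP PySem.Chars.isalpha : Int),
       vc + (cs.countP (fun c => pvVowelList.contains c) : Int),
       words ++ pvToks temp cs) := by
  induction cs with
  | nil => intro wc sc cc vc temp words; by_cases h : temp.isEmpty <;> simp [pvFin, pvToks, h]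
  | cons c cs ih =>
    intro wc sc cc vc temp words
    by_cases ha : PySem.Chars.isalpha c = true
    · have hns : c ≠ ' ' := pv_alpha_not_space c ha
      by_cases hvm : c ∈ pvVowelList
      · have hstep : pvStepA (wc, sc, cc, vc, temp, words) c
            = (wc, sc, cc + 1, vc + 1, temp ++ [c], words) := by simp [pvStepA, ha, hvm]
        rw [List.foldl_cons, hstep, ih]
        simp [pvToks, ha, hvm, List.countP_cons, hns, Prod.ext_iff]
        push_cast
        omega
      · have hstep : pvStepA (wc, sc, cc, vc, temp, words) c
            = (wc, sc, cc + 1, vc, temp ++ [c], words) := by simp [pvStepA, ha, hvm]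
        rw [List.foldl_cons, hstep, ih]
        simp [pvToks, ha, hvm, List.countP_cons, hns, Prod.ext_iff]
        push_cast
        omega
    · have ha' : PySem.Chars.isalpha c = false := by simpa using ha
      have hnv : c ∉ pvVowelList := fun hm => by
        simp [pv_vowel_alpha c (List.elem_eq_true_of_mem hm)] at ha'
      by_cases ht : temp.isEmpty
      · have htemp : temp = [] := by simpa [List.isEmpty_iff] using ht
        subst htemp
        have hstep : pvStepA (wc, sc, cc, vc, [], words) c
            = (wc, if c = ' ' then sc + 1 else sc, cc, vc, [], words) := by
          simp [pvStepA, ha']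
        rw [List.foldl_cons, hstep, ih]
        have hspa : PySem.Chars.isalpha ' ' = false := by decide
        by_cases hsp : c = ' ' <;>
          · simp [pvToks, ha', hsp, hspa, hnv, List.countP_cons, Prod.ext_iff]
            all_goals (push_cast; omega)
      · have ht' : temp.isEmpty = false := by simpa using ht
        have hstep : pvStepA (wc, sc, cc, vc, temp, words) c
            = (wc + 1, if c = ' ' then sc + 1 else sc, cc, vc, [], words ++ [temp]) := by
          simp [pvStepA, ha', ht']
        rw [List.foldl_cons, hstep, ih]
        have hspa : PySem.Chars.isalpha ' ' = false := by decide
        by_cases hsp : c = ' ' <;>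
          · simp [pvToks, ha', ht', hsp, hspa, hnv, List.countP_cons, Prod.ext_iff]
            all_goals (push_cast; omega)

theorem pv_go_mask (cs : List Char) : ∀ (cur : List Char) (acc : List (List Char)),
    PySem.Chars.split₀.go (cs.map (fun c => if PySem.Chars.isalpha c then c else ' ')) cur acc
    = acc.reverse ++ pvToks cur.reverse cs := by
  induction cs with
  | nil =>
    intro cur acc
    by_cases h : cur.isEmpty <;> simp [PySem.Chars.split₀.go, pvToks, h]
  | cons c cs ih =>
    intro cur acc
    by_cases ha : PySem.Chars.isalpha c = true
    · have hns : PySem.Chars.isspace c = false := by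
        rw [PySem.Chars.isalpha, PySem.Chars.isupper, PySem.Chars.islower] at ha
        simp only [Bool.or_eq_true, Bool.and_eq_true, decide_eq_true_eq, Char.le_def,
          UInt32.le_iff_toNat_le] at ha
        have hA : ('A' : Char).val.toNat = 65 := rfl
        have hZ : ('Z' : Char).val.toNat = 90 := rfl
        have hla : ('a' : Char).val.toNat = 97 := rfl
        have hlz : ('z' : Char).val.toNat = 122 := rfl
        rw [PySem.Chars.isspace]
        simp only [Char.toNat, Bool.or_eq_false_iff, Bool.and_eq_false_iff, decide_eq_false_iff_not]
        rw [hA, hZ] at ha; rw [hla, hlz] at ha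
        omega
      simp only [List.map_cons, ha, ite_true, PySem.Chars.split₀.go, hns, Bool.false_eq_true,
        if_false, pvToks]
      rw [ih]
      simp
    · have ha' : PySem.Chars.isalpha c = false := by simpa using ha
      have hsp : PySem.Chars.isspace ' ' = true := by decide
      by_cases hc : cur.isEmpty
      · simp only [List.map_cons, ha', Bool.false_eq_true, if_false, PySem.Chars.split₀.go, hsp,
          ite_true, hc, pvToks]
        rw [ih]
        have : cur = [] := by simpa [List.isEmpty_iff] using hc
        subst this
        simp
      · have hc' : cur.isEmpty = false := by simpa using hc
        simp only [List.map_cons, ha', Bool.false_eq_true, if_false, PySem.Chars.split₀.go, hsp,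
          ite_true, hc', pvToks]
        rw [ih]
        have : cur.reverse.isEmpty = false := by simpa using hc'
        simp [this]

theorem pv_sum_toks (cs : List Char) : ∀ (temp : List Char),
    ((pvToks temp cs).map List.length).sum = temp.length + cs.countP PySem.Chars.isalpha := by
  induction cs with
  | nil => intro temp; by_cases h : temp.isEmpty <;> simp_all [pvToks, List.isEmpty_iff]
  | cons c cs ih =>
    intro temp
    by_cases ha : PySem.Chars.isalpha c = true
    · simp [pvToks, ha, ih, List.countP_cons]; omega
    · have ha' : PySem.Chars.isalpha c = false := by simpa using ha
      have hnv : c ∉ pvVowelList := fun hm => by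
        simp [pv_vowel_alpha c (List.elem_eq_true_of_mem hm)] at ha'
      by_cases ht : temp.isEmpty <;>
        simp_all [pvToks, List.isEmpty_iff, List.countP_cons, ih] <;> omega

theorem pv_vowel_test (c : Char) :
    PySem.Chars.isIn [c] "aeiouAEIOU".toList = pvVowelList.contains c := by
  by_cases h : c ∈ "aeiouAEIOU".toList
  · have h1 : PySem.Chars.isIn [c] "aeiouAEIOU".toList = true := by
      rw [PySem.Chars.isIn_iff_infix]
      obtain ⟨s, t, hst⟩ := List.append_of_mem h
      exact ⟨s, t, by simp [hst]⟩
    have h2 : pvVowelList.contains c = true := by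
      simp at h; simp [pvVowelList]; tauto
    rw [h1, h2]
  · have h1 : PySem.Chars.isIn [c] "aeiouAEIOU".toList = false := by
      rw [PySem.Chars.isIn_eq_false_iff]
      intro hinf
      exact h (hinf.subset (List.mem_singleton_self c))
    have h2 : pvVowelList.contains c = false := by
      simp at h ⊢; simp [pvVowelList]; tauto
    rw [h1, h2]

-- ===== VERDICT (by name: the statement is the Claim_ definition above) =====
theorem calculate_count_spec : Claim_equal_calculate_count := by
  intro sentence _
  unfold Spec_calculate_count calculate_count calculate_count_alt
  set s := PySem.Chars.strip sentence.toList with hs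
  by_cases h : s.isEmpty
  · simp [h]
  · simp only [h, Bool.false_eq_true, if_false]
    have hA := pv_foldA s 0 0 0 0 [] []
    have hB : PySem.Chars.split₀ (s.map (fun c => if PySem.Chars.isalpha c then c else ' '))
        = pvToks [] s := by
      rw [PySem.Chars.split₀]; simpa using pv_go_mask s [] []
    rcases hfold : s.foldl pvStepA (0, 0, 0, 0, ([] : List Char), ([] : List (List Char))) with
      ⟨wc, sc, cc, vc, temp, words⟩
    rw [hfold] at hA
    rw [hB]
    have hspc : ((List.countP (fun c => c == ' ') s : Nat) : Int)
        = ((List.countP (fun c => decide (c = ' ')) s : Nat) : Int) := by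
      exact congrArg Nat.cast (List.countP_congr (fun c _ => by simp))
    have hvw : ((List.countP (fun c => PySem.Chars.isIn [c] "aeiouAEIOU".toList) s : Nat) : Int)
        = ((List.countP (fun c => pvVowelList.contains c) s : Nat) : Int) := by
      exact congrArg Nat.cast (List.countP_congr (fun c _ => by rw [pv_vowel_test]))
    have hcc : (((List.map List.length (pvToks [] s)).sum : Nat) : Int)
        = ((List.countP PySem.Chars.isalpha s : Nat) : Int) := by
      rw [pv_sum_toks]; simp
    by_cases ht : temp.isEmpty
    · simp only [pvFin, ht, ite_true, Prod.mk.injEq, zero_add, List.nil_append] at hA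
      obtain ⟨h1, h2, h3, h4, h5⟩ := hA
      simp only [ht, ite_true]
      rw [h1, h2, h3, h4, h5, hspc, hvw, hcc]
    · have ht' : temp.isEmpty = false := by simpa using ht
      simp only [pvFin, ht', Bool.false_eq_true, ite_false, Prod.mk.injEq, zero_add,
        List.nil_append] at hA
      obtain ⟨h1, h2, h3, h4, h5⟩ := hA
      simp only [ht', Bool.false_eq_true, if_false]
      rw [h1, h2, h3, h4, h5, hspc, hvw, hcc]
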